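-- pv_equiv track=rewrite | github.com/NimbleBrainInc/synapse-collateral | src/mcp_collateral/theme.py | _find_theme_block
-- ===== SOURCE A (Python) =====
-- THEME_START = "// === THEME ==="
--
-- THEME_END = "// === END THEME ==="
--
-- def _find_theme_block(source: str) -> tuple[int | None, int | None]:
--     """Return (start, end) line indices of the theme markers, or (None, None)."""
--     lines = source.splitlines()
--     start = end = None
--     for i, line in enumerate(lines):
--         stripped = line.strip()
--         if stripped == THEME_START:
--             start = i
--         elif stripped == THEME_END:
--             end = i
--             break
--     return start, end
-- ===== SOURCE B (Python) =====
-- THEME_START = "// === THEME ==="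
--
-- THEME_END = "// === END THEME ==="
--
-- def _find_theme_block(source: str) -> tuple[int | None, int | None]:
--     """Two-pass version: first find the first END marker, then the last START
--     marker strictly before it (or in the whole file if no END)."""
--     lines = source.splitlines()
--     end = next((i for i, line in enumerate(lines) if line.strip() == THEME_END), None)
--     window = lines if end is None else lines[:end]
--     rev = next((j for j, line in enumerate(reversed(window)) if line.strip() == THEME_START), None)
--     start = None if rev is None else len(window) - 1 - rev
--     return start, end
-- ===== Notes on version B (the rewrite author's own statement) =====
-- stated objective: alternative
-- what changed: Replaced the single stateful loop with break by two independent passes: find the first END marker, then scan the window before it backwards for the last START marker.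
import Mathlib
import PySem

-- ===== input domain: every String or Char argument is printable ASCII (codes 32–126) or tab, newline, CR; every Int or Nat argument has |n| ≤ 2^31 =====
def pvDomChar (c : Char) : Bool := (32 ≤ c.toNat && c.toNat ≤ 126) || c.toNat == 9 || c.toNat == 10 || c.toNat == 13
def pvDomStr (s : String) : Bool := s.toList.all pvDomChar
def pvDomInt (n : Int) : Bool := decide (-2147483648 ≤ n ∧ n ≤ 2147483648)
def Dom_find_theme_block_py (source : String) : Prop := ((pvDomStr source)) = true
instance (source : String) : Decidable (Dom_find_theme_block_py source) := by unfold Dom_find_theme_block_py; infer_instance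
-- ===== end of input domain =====

-- B replaces A's single stateful forward loop (with break) by two independent passes:
-- find the first END marker, then scan the window before it backwards for the last START.

def pvThemeStart : String := "// === THEME ==="

def pvThemeEnd : String := "// === END THEME ==="

-- ===== PORT A =====
-- the for-loop of A: state is the accumulator `start`; the break returns immediately
def pvLoopA : List (Int × String) → Option Int → Option Int × Option Int
  | [], start => (start, none)
  | (i, line) :: rest, start =>
    let stripped := PySem.Str.strip line
    if stripped == pvThemeStart then pvLoopA rest (some i)
    else if stripped == pvThemeEnd then (start, some i)
    else pvLoopA rest start

def find_theme_block_py (source : String) : Option Int × Option Int :=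
  let lines := PySem.Str.splitlines source
  pvLoopA (PySem.List.enumerate lines 0) none

-- ===== PORT B =====
def find_theme_block_py_alt (source : String) : Option Int × Option Int :=
  let lines := PySem.Str.splitlines source
  -- end = next((i for i, line in enumerate(lines) if line.strip() == THEME_END), None)
  let endIdx := lines.findIdx? (fun l => PySem.Str.strip l == pvThemeEnd)
  -- window = lines if end is None else lines[:end]
  let window := match endIdx with
    | none => lines
    | some k => lines.take k
  -- rev = next((j for j, line in enumerate(reversed(window)) if line.strip() == THEME_START), None)
  let rev := window.reverse.findIdx? (fun l => PySem.Str.strip l == pvThemeStart)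
  -- start = None if rev is None else len(window) - 1 - rev
  let startIdx := rev.map (fun j => window.length - 1 - j)
  (startIdx.map (fun j => (j : Int)), endIdx.map (fun k => (k : Int)))

-- ===== PRECONDITION & SPEC =====
def Spec_find_theme_block_py (source : String) (out : Option Int × Option Int) : Prop := out = find_theme_block_py_alt source
instance (source : String) (out : Option Int × Option Int) : Decidable (Spec_find_theme_block_py source out) := by unfold Spec_find_theme_block_py; infer_instance

-- ===== CLAIM (what is proved, stated in full; the proofs are below) =====
def Claim_equal_find_theme_block_py : Prop := ∀ (source : String), Dom_find_theme_block_py source → Spec_find_theme_block_py source (find_theme_block_py source)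

-- ===== LEMMAS AND PROOFS =====

def pvIsStart (l : String) : Bool := PySem.Str.strip l == pvThemeStart
def pvIsEnd (l : String) : Bool := PySem.Str.strip l == pvThemeEnd
def pvLastStart (w : List String) : Option Nat :=
  (w.reverse.findIdx? pvIsStart).map (fun j => w.length - 1 - j)
theorem pvLastStart_cons (l : String) (w : List String) :
    pvLastStart (l :: w) =
      match pvLastStart w with
      | some j => some (j + 1)
      | none => if pvIsStart l then some 0 else none := by
  unfold pvLastStart
  rw [List.reverse_cons, List.findIdx?_append]
  rcases h : w.reverse.findIdx? pvIsStart with _ | j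
  · simp only [Option.map_none, Option.or, List.findIdx?_cons, List.findIdx?_nil]
    split_ifs <;> simp
  · have hj : j < w.length := by
      have := List.findIdx?_eq_some_iff_findIdx_eq.mp h
      simpa using this.1
    simp only [Option.or, Option.map_some, List.length_cons]
    congr 1
    omega

theorem pvKey (lines : List String) (i₀ : Int) (s : Option Int) :
    pvLoopA (PySem.List.enumerate lines i₀) s =
      ((match pvLastStart (match lines.findIdx? pvIsEnd with
          | none => lines
          | some k => lines.take k) with
        | some j => some (i₀ + j)
        | none => s),
       (lines.findIdx? pvIsEnd).map (fun k => i₀ + k)) := by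
  induction lines generalizing i₀ s with
  | nil => simp [PySem.List.enumerate, pvLoopA, pvLastStart]
  | cons l rest ih =>
    rw [PySem.List.enumerate_cons]
    by_cases hS : pvIsStart l
    · have hE : pvIsEnd l = false := by
        have hs : PySem.Str.strip l = pvThemeStart := by simpa [pvIsStart] using hS
        simp only [pvIsEnd, hs]
        decide
      unfold pvLoopA
      rw [if_pos (by simpa [pvIsStart] using hS), ih (i₀ + 1) (some i₀)]
      rw [List.findIdx?_cons, if_neg (by simp [hE])]
      rcases hfe : rest.findIdx? pvIsEnd with _ | k
      · simp only [hfe, Option.map_none, pvLastStart_cons]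
        rcases hls : pvLastStart rest with _ | j <;>
          simp [hls, hS, Prod.ext_iff] <;> omega
      · simp only [hfe, Option.map_some, List.take_succ_cons, pvLastStart_cons]
        rcases hls : pvLastStart (rest.take k) with _ | j <;>
          simp [hls, hS, Prod.ext_iff] <;> omega
    · unfold pvLoopA
      rw [if_neg (by simpa [pvIsStart] using hS)]
      by_cases hE : pvIsEnd l
      · rw [if_pos (by simpa [pvIsEnd] using hE)]
        rw [List.findIdx?_cons, if_pos (by simpa [pvIsEnd] using hE)]
        simp [pvLastStart]
      · rw [if_neg (by simpa [pvIsEnd] using hE), ih (i₀ + 1) s]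
        rw [List.findIdx?_cons, if_neg (by simpa [pvIsEnd] using hE)]
        rcases hfe : rest.findIdx? pvIsEnd with _ | k
        · simp only [hfe, Option.map_none, pvLastStart_cons]
          rcases hls : pvLastStart rest with _ | j <;>
            simp [hls, hS, Prod.ext_iff] <;> omega
        · simp only [hfe, Option.map_some, List.take_succ_cons, pvLastStart_cons]
          rcases hls : pvLastStart (rest.take k) with _ | j <;>
            simp [hls, hS, Prod.ext_iff] <;> omega

-- ===== VERDICT (by name: the statement is the Claim_ definition above) =====
theorem find_theme_block_py_spec : Claim_equal_find_theme_block_py := by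
  intro source _
  unfold Spec_find_theme_block_py find_theme_block_py find_theme_block_py_alt
  rw [pvKey]
  have e1 : (fun l => PySem.Str.strip l == pvThemeEnd) = pvIsEnd := rfl
  have e2 : (fun l => PySem.Str.strip l == pvThemeStart) = pvIsStart := rfl
  rw [e1, e2]
  rcases hfe : (PySem.Str.splitlines source).findIdx? pvIsEnd with _ | k <;>
    simp only [hfe, pvLastStart, Option.map_none, Option.map_some] <;>
    rcases hx : List.findIdx? pvIsStart _ with _ | j <;>
    simp [hx]
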